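-- pv_equiv track=rewrite | github.com/crparaizo/megadavirada2025 | src/newcomb_benford.py | pegar_primeiros_digitos
-- ===== SOURCE A (Python) =====
-- def pegar_primeiros_digitos(numeros: list):
--     ocorrencias_digitos = {}
--     for numero in numeros:
--         primeiro_digito = numero // 10
--         if primeiro_digito in ocorrencias_digitos:
--             ocorrencias_digitos[primeiro_digito] += 1
--         else:
--             ocorrencias_digitos[primeiro_digito] = 1
--     return ocorrencias_digitos
-- ===== SOURCE B (Python) =====
-- def pegar_primeiros_digitos(numeros: list):
--     # Sort the first-digit keys once, scan the sorted list run by run to get each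
--     # key's count, then emit keys in first-occurrence order (as A's dict does).
--     chaves = [numero // 10 for numero in numeros]
--     ordenadas = sorted(chaves)
--     contagens = {}
--     i = 0
--     n = len(ordenadas)
--     while i < n:
--         j = i
--         while j < n and ordenadas[j] == ordenadas[i]:
--             j += 1
--         contagens[ordenadas[i]] = j - i
--         i = j
--     return {chave: contagens[chave] for chave in dict.fromkeys(chaves)}
-- ===== Notes on version B (the rewrite author's own statement) =====
-- stated objective: alternative
-- what changed: Replaces A's incremental membership-test/accumulate dict loop with sort-then-run-scan: sort the key list once, read each key's count off the length of its run of equal neighbours, and emit keys in first-occurrence order via dict.fromkeys; trades the hash-accumulation pass for an O(n log n) sort plus linear grouped scan.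
import Mathlib
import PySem

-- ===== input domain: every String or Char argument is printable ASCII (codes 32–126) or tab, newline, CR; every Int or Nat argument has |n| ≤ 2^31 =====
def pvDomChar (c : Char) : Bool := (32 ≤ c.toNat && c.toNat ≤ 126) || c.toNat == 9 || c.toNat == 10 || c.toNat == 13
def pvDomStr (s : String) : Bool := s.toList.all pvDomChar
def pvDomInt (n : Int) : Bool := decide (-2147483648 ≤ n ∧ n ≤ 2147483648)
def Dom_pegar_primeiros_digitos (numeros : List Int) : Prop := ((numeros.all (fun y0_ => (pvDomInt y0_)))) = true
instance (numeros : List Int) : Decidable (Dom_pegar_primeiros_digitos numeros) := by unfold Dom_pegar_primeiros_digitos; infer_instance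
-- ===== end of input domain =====

-- B replaces A's incremental membership-test/accumulate dict loop by sort + run-length scan
-- of the sorted key list, emitting keys in first-occurrence order (objective: alternative).

-- ===== PORT A =====
def pegar_primeiros_digitos (numeros : List Int) : List (Int × Int) :=
  (numeros.foldl (fun d numero =>
      let primeiro_digito := PySem.Int.floordiv numero 10
      if d.contains primeiro_digito then
        -- d[primeiro_digito] += 1 (the key is present, so getD reads its current value)
        d.insert primeiro_digito (d.getD primeiro_digito 0 + 1)
      else
        d.insert primeiro_digito 1)
    PySem.Dict.empty).items

-- ===== PORT B =====
-- the while-loop scan of Source B: peel off the leading run of equal elements, record its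
-- length (j - i), continue at the first different element
def pvRuns (l : List Int) : List (Int × Int) :=
  match l with
  | [] => []
  | x :: t =>
      (x, ((t.takeWhile (fun y => y == x)).length + 1 : Int)) ::
        pvRuns (t.dropWhile (fun y => y == x))
termination_by l.length
decreasing_by
  simp only [List.length_cons]
  exact Nat.lt_succ_of_le (List.length_dropWhile_le _ _)

def pegar_primeiros_digitos_alt (numeros : List Int) : List (Int × Int) :=
  let chaves := numeros.map (fun numero => PySem.Int.floordiv numero 10)
  let ordenadas := PySem.List.sorted chaves (fun x => x) false
  -- contagens[k] = run length, one dict entry per run of the sorted list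
  let contagens := (pvRuns ordenadas).foldl (fun d p => d.insert p.1 p.2) PySem.Dict.empty
  -- contagens[chave] never misses (chave ∈ chaves), so getD _ 0 is Python's contagens[chave]
  (PySem.List.dedup chaves).map (fun chave => (chave, contagens.getD chave 0))

-- ===== PRECONDITION & SPEC =====
def Spec_pegar_primeiros_digitos (numeros : List Int) (out : List (Int × Int)) : Prop := out = pegar_primeiros_digitos_alt numeros
instance (numeros : List Int) (out : List (Int × Int)) : Decidable (Spec_pegar_primeiros_digitos numeros out) := by unfold Spec_pegar_primeiros_digitos; infer_instance

-- ===== CLAIM (what is proved, stated in full; the proofs are below) =====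
def Claim_equal_pegar_primeiros_digitos : Prop := ∀ (numeros : List Int), Dom_pegar_primeiros_digitos numeros → Spec_pegar_primeiros_digitos numeros (pegar_primeiros_digitos numeros)

-- ===== LEMMAS AND PROOFS =====

-- A's branching loop body is extensionally the counting insert, so the fold is Counter of the keys.
theorem pv_foldA_eq_counter (l : List Int) (d : PySem.Dict Int Int) :
    l.foldl (fun d numero =>
      let k := PySem.Int.floordiv numero 10
      if d.contains k then d.insert k (d.getD k 0 + 1) else d.insert k 1) d
    = (l.map (fun numero => PySem.Int.floordiv numero 10)).foldl
        (fun d x => d.insert x (d.getD x 0 + 1)) d := by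
  induction l generalizing d with
  | nil => rfl
  | cons a t ih =>
      simp only [List.foldl_cons, List.map_cons]
      rw [ih]
      by_cases h : (d.contains (PySem.Int.floordiv a 10)) = true
      · rw [if_pos h]
      · rw [if_neg h]
        simp only [Bool.not_eq_true] at h
        rw [PySem.Dict.getD_of_not_contains _ _ h]
        norm_num

-- in a ≤-sorted list x :: t, x does not reappear after the leading run of x's
theorem pv_not_mem_dropWhile (x : Int) (t : List Int)
    (hge : ∀ z ∈ t, x ≤ z) (hp : t.Pairwise (· ≤ ·)) :
    x ∉ t.dropWhile (fun y => y == x) := by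
  induction t with
  | nil => simp
  | cons y r ih =>
      by_cases hy : (y == x) = true
      · rw [List.dropWhile_cons, if_pos hy]
        exact ih (fun z hz => hge z (List.mem_cons_of_mem _ hz)) hp.of_cons
      · rw [List.dropWhile_cons, if_neg hy]
        simp only [beq_iff_eq] at hy
        have hyx : x < y :=
          lt_of_le_of_ne (hge y (List.mem_cons_self)) (fun h => hy h.symm)
        intro hmem
        rcases List.mem_cons.mp hmem with h | h
        · exact absurd h.symm hy
        · have : y ≤ x := (List.pairwise_cons.mp hp).1 x h
          omega

-- every key produced by the run scan is an element of the scanned list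
theorem pv_runs_key_mem (l : List Int) : ∀ p ∈ pvRuns l, p.1 ∈ l := by
  induction l using pvRuns.induct with
  | case1 => simp [pvRuns]
  | case2 x t ih =>
      intro p hp
      rw [pvRuns] at hp
      rcases List.mem_cons.mp hp with h | h
      · simp [h]
      · have hm := ih p h
        exact List.mem_cons_of_mem _ (List.Sublist.mem hm (List.dropWhile_sublist _))

-- on a ≤-sorted list the run keys are pairwise distinct
theorem pv_runs_nodup (l : List Int) (hp : l.Pairwise (· ≤ ·)) :
    ((pvRuns l).map Prod.fst).Nodup := by
  induction l using pvRuns.induct with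
  | case1 => simp [pvRuns]
  | case2 x t ih =>
      rw [pvRuns]
      have hge : ∀ z ∈ t, x ≤ z := (List.pairwise_cons.mp hp).1
      have hpt : t.Pairwise (· ≤ ·) := hp.of_cons
      have hpd : (t.dropWhile (fun y => y == x)).Pairwise (· ≤ ·) :=
        List.Pairwise.sublist (List.dropWhile_sublist _) hpt
      simp only [List.map_cons, List.nodup_cons]
      refine ⟨fun hmem => ?_, ih hpd⟩
      rcases List.mem_map.mp hmem with ⟨p, hp', hfst⟩
      have hkm := pv_runs_key_mem _ p hp'
      rw [hfst] at hkm
      exact pv_not_mem_dropWhile x t hge hpt hkm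

-- on a ≤-sorted list each run records exactly the element's total count
theorem pv_runs_count (l : List Int) (hp : l.Pairwise (· ≤ ·)) :
    ∀ c ∈ l, (c, (l.count c : Int)) ∈ pvRuns l := by
  induction l using pvRuns.induct with
  | case1 => simp
  | case2 x t ih =>
      intro c hc
      have hge : ∀ z ∈ t, x ≤ z := (List.pairwise_cons.mp hp).1
      have hpt : t.Pairwise (· ≤ ·) := hp.of_cons
      have hpd : (t.dropWhile (fun y => y == x)).Pairwise (· ≤ ·) :=
        List.Pairwise.sublist (List.dropWhile_sublist _) hpt
      rw [pvRuns]
      by_cases hcx : c = x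
      · subst hcx
        have hcount_take : (t.takeWhile (fun y => y == c)).count c
            = (t.takeWhile (fun y => y == c)).length := by
          rw [List.count_eq_length]
          intro b hb
          have hb2 := List.mem_takeWhile_imp hb
          simp only [beq_iff_eq] at hb2
          exact hb2.symm
        have hcount_drop : (t.dropWhile (fun y => y == c)).count c = 0 :=
          List.count_eq_zero.mpr (pv_not_mem_dropWhile c t hge hpt)
        have htc : t.count c = (t.takeWhile (fun y => y == c)).length := by
          conv_lhs => rw [← List.takeWhile_append_dropWhile (p := fun y => y == c) (l := t)]
          rw [List.count_append, hcount_take, hcount_drop]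
          omega
        have hval : ((c :: t).count c : Int)
            = ((t.takeWhile (fun y => y == c)).length + 1 : Int) := by
          rw [List.count_cons_self, htc]
          push_cast
          ring
        rw [hval]
        exact List.mem_cons_self
      · right
        have hct : c ∈ t := by
          rcases List.mem_cons.mp hc with h | h
          · exact absurd h hcx
          · exact h
        have hcd : c ∈ t.dropWhile (fun y => y == x) := by
          rw [← List.takeWhile_append_dropWhile (p := fun y => y == x) (l := t)] at hct
          rcases List.mem_append.mp hct with h | h
          · have := List.mem_takeWhile_imp h
            simp only [beq_iff_eq] at this
            exact absurd this hcx
          · exact h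
        have hcount : (t.dropWhile (fun y => y == x)).count c = (x :: t).count c := by
          have hcount_take : (t.takeWhile (fun y => y == x)).count c = 0 := by
            rw [List.count_eq_zero]
            intro hmem
            have := List.mem_takeWhile_imp hmem
            simp only [beq_iff_eq] at this
            exact hcx this
          calc (t.dropWhile (fun y => y == x)).count c
              = (t.takeWhile (fun y => y == x)).count c
                + (t.dropWhile (fun y => y == x)).count c := by rw [hcount_take]; omega
            _ = t.count c := by
                rw [← List.count_append, List.takeWhile_append_dropWhile]
            _ = (x :: t).count c := (List.count_cons_of_ne (Ne.symm hcx)).symm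
        exact hcount ▸ ih hpd c hcd

-- the counts dict built from the run scan reads back each element's count (0 off the list)
theorem pv_getD_runs (l : List Int) (hp : l.Pairwise (· ≤ ·)) (c : Int) :
    ((pvRuns l).foldl (fun d p => d.insert p.1 p.2) PySem.Dict.empty).getD c 0
      = (l.count c : Int) := by
  have hitems :
      ((pvRuns l).foldl (fun (d : PySem.Dict Int Int) p => d.insert p.1 p.2)
        PySem.Dict.empty).items = pvRuns l := by
    have := PySem.Dict.items_foldl_insert_fresh (pvRuns l) Prod.fst Prod.snd
      PySem.Dict.empty (by intro a _; rfl) (pv_runs_nodup l hp)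
    simpa using this
  have hkeys :
      ((pvRuns l).foldl (fun (d : PySem.Dict Int Int) p => d.insert p.1 p.2)
        PySem.Dict.empty).keys = (pvRuns l).map Prod.fst := by
    simp [PySem.Dict.keys, hitems]
  by_cases hc : c ∈ l
  · exact PySem.Dict.getD_of_mem_items _
      (by rw [hitems]; exact pv_runs_count l hp c hc)
      (by rw [hkeys]; exact pv_runs_nodup l hp) 0
  · rw [PySem.Dict.getD_of_not_contains]
    · rw [List.count_eq_zero.mpr hc]; rfl
    · rw [Bool.eq_false_iff]
      intro hcontains
      have := (PySem.Dict.contains_iff_mem_keys _ _).mp hcontains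
      rw [hkeys] at this
      rcases List.mem_map.mp this with ⟨p, hp', hfst⟩
      exact hc (hfst ▸ pv_runs_key_mem l p hp')

-- ===== VERDICT (by name: the statement is the Claim_ definition above) =====
theorem pegar_primeiros_digitos_spec : Claim_equal_pegar_primeiros_digitos := by
  intro numeros _
  unfold Spec_pegar_primeiros_digitos pegar_primeiros_digitos pegar_primeiros_digitos_alt
  rw [pv_foldA_eq_counter, PySem.Dict.foldl_insert_getD_add_one_eq_counter,
      PySem.Dict.items_counter]
  simp only [PySem.List.dedup_eq_ofList]
  apply List.map_congr_left
  intro c hc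
  have hcmem : c ∈ numeros.map (fun numero => PySem.Int.floordiv numero 10) :=
    (PySem.Set.mem_ofList _ _).mp hc
  have hpair : (PySem.List.sorted (numeros.map (fun numero => PySem.Int.floordiv numero 10))
      (fun x => x) false).Pairwise (· ≤ ·) := by
    simpa using PySem.List.sorted_pairwise
      (numeros.map (fun numero => PySem.Int.floordiv numero 10)) (fun x => x)
  rw [pv_getD_runs _ hpair c]
  have hperm := PySem.List.sorted_perm
    (numeros.map (fun numero => PySem.Int.floordiv numero 10)) (fun x => x) false
  rw [hperm.count_eq]
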